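-- pv_equiv track=rewrite | github.com/SSAFY-14th-Seoul02/algorithm-study | seonil/BOJ/PYTHON/boj1715.py | find_min_comparisons
-- ===== SOURCE A (Python) =====
-- from heapq import heappop, heappush, heapify
--
-- def find_min_comparisons(bundles):
--
--     # 리스트를 최소 힙 구조로 변환 → 매번 가장 작은 두 묶음을 선택하기 위해 필요
--     heapify(bundles)
--
--     total_comparisons = 0   # 전체 비교 횟수 누적 변수
--
--     # 카드 묶음이 하나만 남을 때까지 반복
--     while len(bundles) > 1:
--         # 가장 작은 두 묶음 a, b를 꺼냄 (그리디 전략: 항상 가장 작은 것끼리 먼저 합쳐야 전체 비용 최소)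
--         a = heappop(bundles)
--         b = heappop(bundles)
--         # 두 묶음을 합치는 데 필요한 비교 횟수는 a + b
--         s = a + b
--         # 이번 합치기에서 발생한 비교 횟수 누적
--         total_comparisons += s
--         # 합쳐진 묶음을 다시 힙에 넣기
--         heappush(bundles, s)
--     # 모든 묶음을 하나로 만들 때까지의 최소 비교 횟수 반환
--     return total_comparisons
-- ===== SOURCE B (Python) =====
-- from collections import deque
--
--
-- def find_min_comparisons(bundles):
--     # Two-queue Huffman merge: sort once, then run the merge phase with two
--     # FIFO queues -- the sorted original bundles and the merged sums, which
--     # are produced in an order that keeps the sums queue sorted (each new sum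
--     # x+y satisfies z <= 2*min(x,y) <= x+y for every sum z still queued), so
--     # the global minimum is always one of the two queue fronts.  No heap and
--     # no re-insertion into the middle of a list.
--     # Return-value equivalence only: A heapifies its argument in place, B
--     # leaves the argument untouched.
--     leaves = deque(sorted(bundles))
--     sums = deque()
--
--     def pop_smallest():
--         if not sums or (leaves and leaves[0] <= sums[0]):
--             return leaves.popleft()
--         return sums.popleft()
--
--     total = 0
--     while len(leaves) + len(sums) > 1:
--         s = pop_smallest() + pop_smallest()
--         total += s
--         sums.append(s)
--     return total
-- ===== Notes on version B (the rewrite author's own statement) =====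
-- stated objective: faster
-- what changed: Replaces the heap-based greedy loop by the classic two-queue Huffman merge: sort once, then merge using two FIFO queues (sorted leaves and merged sums); the sums queue provably stays sorted (each new sum x+y bounds every queued sum z by z <= 2*min(x,y) <= x+y), so each merge step is O(1) queue-front work instead of O(log n) heap operations.
import Mathlib
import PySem

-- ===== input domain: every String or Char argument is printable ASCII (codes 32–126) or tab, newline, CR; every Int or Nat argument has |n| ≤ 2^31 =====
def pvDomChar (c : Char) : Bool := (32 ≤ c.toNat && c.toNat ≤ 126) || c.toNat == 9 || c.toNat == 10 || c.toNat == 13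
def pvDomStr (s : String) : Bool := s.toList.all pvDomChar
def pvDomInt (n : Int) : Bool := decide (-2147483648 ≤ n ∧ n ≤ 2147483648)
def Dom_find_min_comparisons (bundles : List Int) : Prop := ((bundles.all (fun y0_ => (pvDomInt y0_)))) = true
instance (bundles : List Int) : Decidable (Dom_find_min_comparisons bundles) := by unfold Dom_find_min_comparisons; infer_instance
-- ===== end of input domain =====

-- B replaces the heap-based greedy loop by the two-queue Huffman merge (sort once, then merge
-- from the fronts of a leaves queue and a sums queue); equivalence is about the RETURN value
-- only — Python A heapifies its argument in place, B leaves it untouched.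

-- ===== PORT A =====
-- heapq is ported at the level of the library's contract: heappop returns the minimum of the
-- heap's contents and removes it (its first occurrence), heappush adds the element at the end,
-- heapify leaves the contents unchanged.  The internal array layout of the heap is not
-- observable in A's return value.
def pyHeappop (l : List Int) : Option (Int × List Int) :=
  match PySem.List.min? l (fun x => x) with
  | none => none
  | some m => some (m, l.erase m)

-- the while loop; fuel = initial length bounds the iteration count (each round shrinks the heap by 1)
def goA : Nat → List Int → Int → Int
  | 0, _, total => total
  | fuel + 1, l, total =>
    if l.length > 1 then
      match pyHeappop l with
      | none => total
      | some (a, l1) =>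
        match pyHeappop l1 with
        | none => total
        | some (b, l2) =>
          let s := a + b
          goA fuel (l2 ++ [s]) (total + s)
    else total

def find_min_comparisons (bundles : List Int) : Int :=
  goA bundles.length bundles 0

-- ===== PORT B =====
-- Source B's pop_smallest: take the front of the sums queue unless it is empty or the leaves
-- front is ≤; returns the popped value and the two remaining queues.  The ([],[]) case is
-- unreachable (the loop guard guarantees at least two elements before each pair of pops).
def popSmallest (leaves sums : List Int) : Int × List Int × List Int :=
  match leaves, sums with
  | [], [] => (0, [], [])
  | [], z :: zs => (z, [], zs)
  | x :: xs, [] => (x, xs, [])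
  | x :: xs, z :: zs => if x ≤ z then (x, xs, z :: zs) else (z, x :: xs, zs)

-- Source B's while loop over the two queues; fuel = initial length bounds the iteration count
def goB : Nat → List Int → List Int → Int → Int
  | 0, _, _, total => total
  | fuel + 1, leaves, sums, total =>
    if leaves.length + sums.length > 1 then
      match popSmallest leaves sums with
      | (x, l1, s1) =>
        match popSmallest l1 s1 with
        | (y, l2, s2) =>
          let s := x + y
          goB fuel l2 (s2 ++ [s]) (total + s)
    else total

def find_min_comparisons_alt (bundles : List Int) : Int :=
  goB bundles.length (PySem.List.sorted bundles (fun x => x)) [] 0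

-- ===== PRECONDITION & SPEC =====
def Spec_find_min_comparisons (bundles : List Int) (out : Int) : Prop := out = find_min_comparisons_alt bundles
instance (bundles : List Int) (out : Int) : Decidable (Spec_find_min_comparisons bundles out) := by unfold Spec_find_min_comparisons; infer_instance

-- ===== CLAIM (what is proved, stated in full; the proofs are below) =====
def Claim_equal_find_min_comparisons : Prop := ∀ (bundles : List Int), Dom_find_min_comparisons bundles → Spec_find_min_comparisons bundles (find_min_comparisons bundles)

-- ===== LEMMAS AND PROOFS =====

-- heappop on any permutation of x :: m where x is a lower bound of m returns x
lemma min?_of_perm_min {l m : List Int} {x : Int}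
    (hp : l.Perm (x :: m)) (hmin : ∀ w ∈ m, x ≤ w) :
    PySem.List.min? l (fun v => v) = some x := by
  obtain ⟨n, hn⟩ : ∃ n, PySem.List.min? l (fun v => v) = some n := by
    cases h : PySem.List.min? l (fun v => v) with
    | none =>
      have : l = [] := (PySem.List.min?_eq_none_iff l (fun v => v)).mp h
      subst this
      simpa using hp.length_eq
    | some n => exact ⟨n, rfl⟩
  have hmem : n ∈ l := PySem.List.min?_mem hn
  have hnx : n ≤ x := PySem.List.min?_isMin hn x (hp.mem_iff.mpr (List.mem_cons_self))
  have hxn : x ≤ n := by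
    rcases List.mem_cons.mp (hp.mem_iff.mp hmem) with rfl | hmem'
    · exact le_refl _
    · exact hmin n hmem'
  rw [hn, le_antisymm hnx hxn]

-- what one pop does, given the two-queue invariant
lemma pop_spec (q1 q2 : List Int)
    (hne : q1.length + q2.length > 0)
    (h1 : q1.Pairwise (· ≤ ·)) (h2 : q2.Pairwise (· ≤ ·))
    (h3 : ∀ w ∈ q1, ∀ z ∈ q2, z ≤ 2 * w)
    (h4 : q2.Pairwise (fun u v => v ≤ 2 * u)) :
    ∃ x q1' q2', popSmallest q1 q2 = (x, q1', q2') ∧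
      q1'.Sublist q1 ∧ q2'.Sublist q2 ∧
      (q1 ++ q2).Perm (x :: (q1' ++ q2')) ∧
      (∀ w ∈ q1' ++ q2', x ≤ w) ∧
      (∀ z ∈ q2', z ≤ 2 * x) := by
  match q1, q2 with
  | [], [] => simp at hne
  | [], z :: zs =>
    refine ⟨z, [], zs, rfl, List.Sublist.refl _, List.sublist_cons_self z zs, ?_, ?_, ?_⟩
    · simp
    · intro w hw
      exact (List.pairwise_cons.mp h2).1 w (by simpa using hw)
    · intro w hw
      exact (List.pairwise_cons.mp h4).1 w hw
  | x :: xs, [] =>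
    refine ⟨x, xs, [], rfl, List.sublist_cons_self x xs, List.Sublist.refl _, ?_, ?_, ?_⟩
    · simp
    · intro w hw
      exact (List.pairwise_cons.mp h1).1 w (by simpa using hw)
    · intro z hz; simp at hz
  | x :: xs, z :: zs =>
    by_cases hxz : x ≤ z
    · refine ⟨x, xs, z :: zs, by simp [popSmallest, hxz], List.sublist_cons_self x xs,
        List.Sublist.refl _, List.Perm.refl _, ?_, ?_⟩
      · intro w hw
        rcases List.mem_append.mp hw with hw | hw
        · exact (List.pairwise_cons.mp h1).1 w hw
        · rcases List.mem_cons.mp hw with rfl | hw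
          · exact hxz
          · exact le_trans hxz ((List.pairwise_cons.mp h2).1 w hw)
      · intro w hw
        exact h3 x List.mem_cons_self w hw
    · refine ⟨z, x :: xs, zs, by simp [popSmallest, hxz], List.Sublist.refl _,
        List.sublist_cons_self z zs, List.perm_middle, ?_, ?_⟩
      · intro w hw
        rcases List.mem_append.mp hw with hw | hw
        · rcases List.mem_cons.mp hw with rfl | hw
          · exact le_of_not_ge hxz
          · exact le_trans (le_of_not_ge hxz) ((List.pairwise_cons.mp h1).1 w hw)
        · exact (List.pairwise_cons.mp h2).1 w hw
      · intro w hw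
        exact (List.pairwise_cons.mp h4).1 w hw

lemma go_eq : ∀ (n : Nat) (l q1 q2 : List Int) (t : Int),
    l.Perm (q1 ++ q2) →
    q1.Pairwise (· ≤ ·) → q2.Pairwise (· ≤ ·) →
    (∀ w ∈ q1, ∀ z ∈ q2, z ≤ 2 * w) →
    q2.Pairwise (fun u v => v ≤ 2 * u) →
    goA n l t = goB n q1 q2 t := by
  intro n
  induction n with
  | zero => intro l q1 q2 t _ _ _ _ _; rfl
  | succ n ih =>
    intro l q1 q2 t hp h1 h2 h3 h4
    have hlen : l.length = q1.length + q2.length := by simpa using hp.length_eq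
    by_cases hbig : q1.length + q2.length > 1
    · -- first pop
      obtain ⟨x, q1a, q2a, he1, hs1a, hs2a, hpa, hmina, hq2a⟩ :=
        pop_spec q1 q2 (by omega) h1 h2 h3 h4
      have h1a : q1a.Pairwise (· ≤ ·) := h1.sublist hs1a
      have h2a : q2a.Pairwise (· ≤ ·) := h2.sublist hs2a
      have h3a : ∀ w ∈ q1a, ∀ z ∈ q2a, z ≤ 2 * w := fun w hw z hz =>
        h3 w (hs1a.mem hw) z (hs2a.mem hz)
      have h4a : q2a.Pairwise (fun u v => v ≤ 2 * u) := h4.sublist hs2a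
      have hlena : q1a.length + q2a.length + 1 = q1.length + q2.length := by
        have := hpa.length_eq; simp at this; omega
      -- second pop
      obtain ⟨y, q1b, q2b, he2, hs1b, hs2b, hpb, hminb, hq2b⟩ :=
        pop_spec q1a q2a (by omega) h1a h2a h3a h4a
      have hymem : y ∈ q1a ++ q2a := hpb.mem_iff.mpr List.mem_cons_self
      have hxy : x ≤ y := hmina y hymem
      -- A's two heappops produce the same values x then y
      have hm1 : PySem.List.min? l (fun v => v) = some x := min?_of_perm_min (hp.trans hpa) hmina
      have hpe1 : (l.erase x).Perm (q1a ++ q2a) := by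
        have := (hp.trans hpa).erase x
        simpa using this
      have hm2 : PySem.List.min? (l.erase x) (fun v => v) = some y :=
        min?_of_perm_min (hpe1.trans hpb) hminb
      have hpe2 : ((l.erase x).erase y).Perm (q1b ++ q2b) := by
        have := (hpe1.trans hpb).erase y
        simpa using this
      -- re-establish the invariant for the next state
      have hq2s : ∀ z ∈ q2b, z ≤ x + y := by
        intro z hz
        have hzx : z ≤ 2 * x := hq2a z (hs2b.mem hz)
        have hzy : z ≤ 2 * y := hq2b z hz
        omega
      have hge : ∀ w ∈ q1b ++ q2b, x + y ≤ 2 * w := by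
        intro w hw
        have hwy : y ≤ w := hminb w hw
        have hwx : x ≤ w := hmina w (hpb.mem_iff.mpr (List.mem_cons_of_mem _ hw))
        omega
      have h2n : (q2b ++ [x + y]).Pairwise (· ≤ ·) := by
        refine List.pairwise_append.mpr ⟨h2a.sublist hs2b, by simp, ?_⟩
        intro z hz w hw
        rcases List.mem_singleton.mp hw with rfl
        exact hq2s z hz
      have h4n : (q2b ++ [x + y]).Pairwise (fun u v => v ≤ 2 * u) := by
        refine List.pairwise_append.mpr ⟨h4a.sublist hs2b, by simp, ?_⟩
        intro z hz w hw
        rcases List.mem_singleton.mp hw with rfl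
        exact hge z (List.mem_append.mpr (Or.inr hz))
      have h3n : ∀ w ∈ q1b, ∀ z ∈ q2b ++ [x + y], z ≤ 2 * w := by
        intro w hw z hz
        rcases List.mem_append.mp hz with hz | hz
        · exact h3a w (hs1b.mem hw) z (hs2b.mem hz)
        · rcases List.mem_singleton.mp hz with rfl
          exact hge w (List.mem_append.mpr (Or.inl hw))
      have hpn : (((l.erase x).erase y) ++ [x + y]).Perm (q1b ++ (q2b ++ [x + y])) := by
        have := hpe2.append_right [x + y]
        simpa [List.append_assoc] using this
      -- unfold one round of both loops
      show goA (n + 1) l t = goB (n + 1) q1 q2 t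
      rw [goA, goB, if_pos (by omega), if_pos hbig]
      simp only [pyHeappop, hm1, hm2, he1, he2]
      exact ih _ _ _ _ hpn (h1a.sublist hs1b) h2n h3n h4n
    · show goA (n + 1) l t = goB (n + 1) q1 q2 t
      rw [goA, goB, if_neg (by omega), if_neg hbig]

-- ===== VERDICT (by name: the statement is the Claim_ definition above) =====
theorem find_min_comparisons_spec : Claim_equal_find_min_comparisons := by
  intro bundles _
  unfold Spec_find_min_comparisons find_min_comparisons find_min_comparisons_alt
  have hperm : bundles.Perm (PySem.List.sorted bundles (fun x => x) ++ []) := by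
    simpa using (PySem.List.sorted_perm bundles (fun x => x) false).symm
  exact go_eq bundles.length bundles _ [] 0 hperm
    (PySem.List.sorted_pairwise bundles (fun x => x)) (by simp) (by simp) (by simp)
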